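-- pv_equiv track=rewrite | github.com/vaibhav-jain-dev/learning-algo | problems/graphs/traversal/dfs-traversal/python_code.py | dfs_all_components
-- ===== SOURCE A (Python) =====
-- from typing import Dict, List, Set
--
-- def dfs_all_components(graph: Dict[int, List[int]]) -> List[List[int]]:
--     """
--     Perform DFS covering all connected components.
--
--     Args:
--         graph: Adjacency list representation of the graph
--
--     Returns:
--         List of DFS traversals, one for each connected component
--     """
--     if not graph:
--         return []
--
--     visited: Set[int] = set()
--     components = []
--
--     def dfs(node: int, component: List[int]):
--         visited.add(node)
--         component.append(node)
--
--         for neighbor in graph[node]: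
--             if neighbor not in visited:
--                 dfs(neighbor, component)
--
--     for node in graph:
--         if node not in visited:
--             component = []
--             dfs(node, component)
--             components.append(component)
--
--     return components
-- ===== SOURCE B (Python) =====
-- def dfs_all_components(graph):
--     """DFS over all components, iterative: explicit stack, mark-on-pop, neighbors pushed reversed."""
--     visited = set()
--     components = []
--     for node in graph:
--         if node in visited:
--             continue
--         component = []
--         stack = [node]
--         while stack:
--             n = stack.pop()
--             if n in visited:
--                 continue
--             visited.add(n)
--             component.append(n)
--             for nb in reversed(graph[n]):
--                 stack.append(nb)
--         components.append(component)
--     return components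
-- ===== Notes on version B (the rewrite author's own statement) =====
-- stated objective: alternative
-- what changed: Replaces the recursive dfs helper (shared mutable visited set, recursion per node) with an explicit stack: pop a node, skip if visited, else mark, append, and push its neighbors in reversed order, which reproduces the recursive preorder exactly without recursion.
import Mathlib
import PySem

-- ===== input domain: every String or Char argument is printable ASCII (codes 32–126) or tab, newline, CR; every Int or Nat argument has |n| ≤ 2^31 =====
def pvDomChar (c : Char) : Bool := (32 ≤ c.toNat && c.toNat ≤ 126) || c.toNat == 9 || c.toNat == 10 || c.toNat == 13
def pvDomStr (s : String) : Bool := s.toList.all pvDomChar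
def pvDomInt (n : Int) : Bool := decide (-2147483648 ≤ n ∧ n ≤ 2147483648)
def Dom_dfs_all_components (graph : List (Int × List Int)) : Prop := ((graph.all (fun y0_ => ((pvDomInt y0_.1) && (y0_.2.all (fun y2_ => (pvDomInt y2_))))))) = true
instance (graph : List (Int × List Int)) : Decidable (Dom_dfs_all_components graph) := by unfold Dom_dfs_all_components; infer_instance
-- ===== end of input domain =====

-- B replaces A's recursive dfs helper by an explicit stack (pop, mark-on-pop, push neighbors
-- reversed), same outer loop over the keys; equal return value, no recursion depth limit.

-- number of keys of `graph` not yet in the visited set `v` (termination measure / fuel bound)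
def pvKeysLeft (graph : List (Int × List Int)) (v : PySem.Set Int) : Nat :=
  (graph.map (·.1)).countP (fun k => !(PySem.Set.contains v k))

theorem pvCountP_add_lt {l : List Int} {v : PySem.Set Int} {n : Int}
    (hk : n ∈ l) (hv : n ∉ v) :
    l.countP (fun k => !(PySem.Set.contains (PySem.Set.add v n) k)) <
      l.countP (fun k => !(PySem.Set.contains v k)) := by
  induction l with
  | nil => simp at hk
  | cons a l ih =>
    have hmono : l.countP (fun k => !(PySem.Set.contains (PySem.Set.add v n) k)) ≤
        l.countP (fun k => !(PySem.Set.contains v k)) := by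
      apply List.countP_mono_left
      intro k _ h
      simp only [Bool.not_eq_true', ← Bool.not_eq_true, PySem.Set.contains_iff,
        PySem.Set.mem_add] at h ⊢
      exact fun hm => h (Or.inl hm)
    simp only [List.countP_cons]
    by_cases han : a = n
    · subst han
      have h1 : (!(PySem.Set.contains (PySem.Set.add v a) a)) = false := by
        simp [PySem.Set.mem_add]
      have h2 : (!(PySem.Set.contains v a)) = true := by simp [hv]
      rw [h1, h2]
      simp only [Bool.false_eq_true, if_false, if_true]
      omega
    · have hk' : n ∈ l := by
        rcases List.mem_cons.mp hk with h | h
        · exact absurd h.symm han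
        · exact h
      have hlt := ih hk'
      have hle : (if (!(PySem.Set.contains (PySem.Set.add v n) a)) = true then 1 else 0) ≤
          (if (!(PySem.Set.contains v a)) = true then 1 else 0) := by
        by_cases hc : a ∈ v
        · simp [PySem.Set.mem_add, hc]
        · simp [PySem.Set.mem_add, hc, han]
      omega

theorem pvKeysLeft_add_lt (graph : List (Int × List Int)) {v : PySem.Set Int} {n : Int}
    (hk : n ∈ graph.map (·.1)) (hv : n ∉ v) :
    pvKeysLeft graph (PySem.Set.add v n) < pvKeysLeft graph v :=
  pvCountP_add_lt hk hv

theorem pvKeysLeft_add_eq (graph : List (Int × List Int)) {v : PySem.Set Int} {n : Int}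
    (hk : n ∉ graph.map (·.1)) :
    pvKeysLeft graph (PySem.Set.add v n) = pvKeysLeft graph v := by
  unfold pvKeysLeft
  apply List.countP_congr
  intro k hkm
  have hne : k ≠ n := fun h => hk (h ▸ hkm)
  simp [PySem.Set.mem_add, hne]

theorem pv_get?_mem_keys {graph : List (Int × List Int)} {n : Int} {ns : List Int}
    (h : (PySem.Dict.mk graph).get? n = some ns) : n ∈ graph.map (·.1) := by
  have : (PySem.Dict.mk graph).get? n ≠ none := by simp [h]
  have hm := (not_iff_not.mpr (PySem.Dict.get?_eq_none_iff_not_mem_keys (d := PySem.Dict.mk graph) (k := n))).mp this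
  simpa [PySem.Dict.keys_mk] using not_not.mp hm

-- ===== PORT A =====
-- recursive helper `dfs`, ported with a fuel parameter as totality guard (A's recursion depth is
-- at most pvKeysLeft + 1, so the fuel `graph.length + 1` supplied below is never exhausted);
-- `graph[node]` is `getD _ _ []` — Python raises KeyError on a missing key, excluded by Pre_.
def pvDfsA (graph : List (Int × List Int)) :
    Nat → Int → PySem.Set Int → List Int → PySem.Set Int × List Int
  | 0, _, v, c => (v, c)
  | f + 1, n, v, c =>
    ((PySem.Dict.mk graph).getD n []).foldl
      (fun s nb => if PySem.Set.contains s.1 nb then s else pvDfsA graph f nb s.1 s.2)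
      (PySem.Set.add v n, c ++ [n])

def dfs_all_components (graph : List (Int × List Int)) : List (List Int) :=
  if graph = [] then []
  else
    (graph.foldl
      (fun (s : PySem.Set Int × List (List Int)) p =>
        if PySem.Set.contains s.1 p.1 then s
        else
          let r := pvDfsA graph (graph.length + 1) p.1 s.1 []
          (r.1, s.2 ++ [r.2]))
      (PySem.Set.empty, [])).2

-- ===== PORT B =====
-- the while loop: stack with head = top (Python pops from the end, pushes reversed(graph[n]),
-- so the Lean stack is `ns ++ rest`); on a missing key Python raises KeyError (outside Pre_),
-- the port continues with no neighbors.
def pvStack (graph : List (Int × List Int)) :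
    List Int → PySem.Set Int → List Int → PySem.Set Int × List Int
  | [], v, c => (v, c)
  | n :: rest, v, c =>
    if _h : PySem.Set.contains v n then pvStack graph rest v c
    else
      match _hg : (PySem.Dict.mk graph).get? n with
      | some ns => pvStack graph (ns ++ rest) (PySem.Set.add v n) (c ++ [n])
      | none => pvStack graph rest (PySem.Set.add v n) (c ++ [n])
  termination_by st v _ => (pvKeysLeft graph v, st.length)
  decreasing_by
  · exact Prod.Lex.right _ (by simp)
  · exact Prod.Lex.left _ _ (pvKeysLeft_add_lt graph (pv_get?_mem_keys _hg)
      (by simpa [PySem.Set.contains_iff] using _h))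
  · rw [pvKeysLeft_add_eq graph (by
      simpa [PySem.Dict.keys_mk] using
        (PySem.Dict.get?_eq_none_iff_not_mem_keys (d := PySem.Dict.mk graph) (k := n)).mp _hg)]
    exact Prod.Lex.right _ (by simp)

def dfs_all_components_alt (graph : List (Int × List Int)) : List (List Int) :=
  (graph.foldl
    (fun (s : PySem.Set Int × List (List Int)) p =>
      if PySem.Set.contains s.1 p.1 then s
      else
        let r := pvStack graph [p.1] s.1 []
        (r.1, s.2 ++ [r.2]))
    (PySem.Set.empty, [])).2

-- ===== PRECONDITION & SPEC =====
-- Pre_ excludes graphs that mention a neighbor that is not a key (Python A raises KeyError on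
-- reaching it, and B raises the same KeyError), and graphs whose key list has duplicates (a
-- Python dict cannot have them; the association-list encoding is ambiguous there).
def Pre_dfs_all_components (graph : List (Int × List Int)) : Prop :=
  (graph.map (·.1)).Nodup ∧ ∀ p ∈ graph, ∀ nb ∈ p.2, nb ∈ graph.map (·.1)
instance (graph : List (Int × List Int)) : Decidable (Pre_dfs_all_components graph) := by
  unfold Pre_dfs_all_components; infer_instance

def pvWitness_dfs_all_components : (List (Int × List Int)) := [(0, [1]), (1, [0]), (2, [])]

def Spec_dfs_all_components (graph : List (Int × List Int)) (out : List (List Int)) : Prop := out = dfs_all_components_alt graph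
instance (graph : List (Int × List Int)) (out : List (List Int)) : Decidable (Spec_dfs_all_components graph out) := by unfold Spec_dfs_all_components; infer_instance

-- ===== CLAIM (what is proved, stated in full; the proofs are below) =====
def Claim_equal_dfs_all_components : Prop := ∀ (graph : List (Int × List Int)), Dom_dfs_all_components graph → Pre_dfs_all_components graph → Spec_dfs_all_components graph (dfs_all_components graph)

-- ===== LEMMAS AND PROOFS =====

theorem pvKeysLeft_mono (graph : List (Int × List Int)) {v w : PySem.Set Int}
    (h : v ⊆ w) : pvKeysLeft graph w ≤ pvKeysLeft graph v := by
  unfold pvKeysLeft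
  apply List.countP_mono_left
  intro k _ hk
  simp only [Bool.not_eq_true', ← Bool.not_eq_true, PySem.Set.contains_iff] at hk ⊢
  exact fun hm => hk (h hm)

theorem pvKeysLeft_le_length (graph : List (Int × List Int)) (v : PySem.Set Int) :
    pvKeysLeft graph v ≤ graph.length := by
  unfold pvKeysLeft
  calc _ ≤ (graph.map (·.1)).length := List.countP_le_length
  _ = graph.length := by simp


-- the visited set only grows through A's recursive helper
theorem pvDfsA_subset (graph : List (Int × List Int)) :
    ∀ (f : Nat) (n : Int) (v : PySem.Set Int) (c : List Int), v ⊆ (pvDfsA graph f n v c).1 := by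
  intro f
  induction f with
  | zero => intro n v c; simp [pvDfsA]
  | succ f ih =>
    intro n v c
    have hfold : ∀ (ns : List Int) (s : PySem.Set Int × List Int),
        s.1 ⊆ (ns.foldl
          (fun s nb => if PySem.Set.contains s.1 nb then s else pvDfsA graph f nb s.1 s.2) s).1 := by
      intro ns
      induction ns with
      | nil => intro s; simp
      | cons nb ns ihn =>
        intro s
        simp only [List.foldl_cons]
        by_cases hc : PySem.Set.contains s.1 nb
        · simp only [hc, if_true]
          exact ihn s
        · simp only [hc, Bool.false_eq_true, if_false]
          exact (ih nb s.1 s.2).trans (ihn _)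
    have h1 : v ⊆ PySem.Set.add v n := fun x hx => (PySem.Set.mem_add _ _ _).mpr (Or.inl hx)
    exact h1.trans (by simpa [pvDfsA] using hfold ((PySem.Dict.mk graph).getD n []) (PySem.Set.add v n, c ++ [n]))

-- simulation: popping an unvisited node runs A's recursive dfs on it, provided enough fuel
theorem pvStack_sim (graph : List (Int × List Int)) :
    ∀ (f : Nat) (n : Int) (v : PySem.Set Int) (c : List Int) (st : List Int),
      n ∉ v → pvKeysLeft graph v < f →
      pvStack graph (n :: st) v c =
        pvStack graph st (pvDfsA graph f n v c).1 (pvDfsA graph f n v c).2 := by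
  intro f
  induction f using Nat.strong_induction_on with
  | _ f ih =>
    intro n v c st hn hf
    match f, hf with
    | f + 1, hf =>
      have hcont : ¬ (PySem.Set.contains v n = true) := by
        simpa [PySem.Set.contains_iff] using hn
      cases hg : (PySem.Dict.mk graph).get? n with
      | none =>
        have hns : (PySem.Dict.mk graph).getD n [] = [] :=
          PySem.Dict.getD_of_get?_eq_none _ _ hg
        rw [pvStack, dif_neg hcont]
        split
        · next ns' heq => rw [hg] at heq; simp at heq
        · simp [pvDfsA, hns]
      | some ns =>
        have hns : (PySem.Dict.mk graph).getD n [] = ns := PySem.Dict.getD_of_get?_eq_some _ _ hg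
        have hlt : pvKeysLeft graph (PySem.Set.add v n) < f :=
          lt_of_lt_of_le (pvKeysLeft_add_lt graph (pv_get?_mem_keys hg) hn) (by omega)
        have hfold : ∀ (l : List Int) (s : PySem.Set Int × List Int),
            pvKeysLeft graph s.1 < f →
            pvStack graph (l ++ st) s.1 s.2 =
              pvStack graph st
                (l.foldl (fun s nb => if PySem.Set.contains s.1 nb then s else pvDfsA graph f nb s.1 s.2) s).1
                (l.foldl (fun s nb => if PySem.Set.contains s.1 nb then s else pvDfsA graph f nb s.1 s.2) s).2 := by
          intro l
          induction l with
          | nil => intro s _; simp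
          | cons nb l ihl =>
            intro s hs
            simp only [List.cons_append, List.foldl_cons]
            by_cases hc : PySem.Set.contains s.1 nb
            · rw [pvStack]
              simp only [hc, dite_true]
              exact ihl s hs
            · have hnbv : nb ∉ s.1 := by simpa [PySem.Set.contains_iff] using hc
              rw [ih f (by omega) nb s.1 s.2 (l ++ st) hnbv hs]
              simp only [hc, Bool.false_eq_true, if_false]
              exact ihl _ (lt_of_le_of_lt
                (le_refl _ |>.trans (pvKeysLeft_mono graph (pvDfsA_subset graph f nb s.1 s.2))) hs)
        rw [pvStack, dif_neg hcont]
        split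
        · next ns' heq =>
          rw [hg] at heq
          cases Option.some.inj heq
          rw [hfold ns (PySem.Set.add v n, c ++ [n]) hlt]
          simp [pvDfsA, hns]
        · next heq => rw [hg] at heq; simp at heq

-- per-start-node agreement of the two inner traversals
theorem pv_start_eq (graph : List (Int × List Int)) (v : PySem.Set Int) (k : Int)
    (hk : k ∉ v) :
    pvStack graph [k] v [] = pvDfsA graph (graph.length + 1) k v [] := by
  have hf : pvKeysLeft graph v < graph.length + 1 :=
    lt_of_le_of_lt (pvKeysLeft_le_length graph v) (by omega)
  rw [pvStack_sim graph (graph.length + 1) k v [] [] hk hf]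
  rw [pvStack]

-- the two outer loops agree step for step
theorem pv_outer_eq (graph : List (Int × List Int)) :
    ∀ (l : List (Int × List Int)) (v : PySem.Set Int) (comps : List (List Int)),
      l.foldl
        (fun (s : PySem.Set Int × List (List Int)) p =>
          if PySem.Set.contains s.1 p.1 then s
          else
            let r := pvDfsA graph (graph.length + 1) p.1 s.1 []
            (r.1, s.2 ++ [r.2])) (v, comps) =
      l.foldl
        (fun (s : PySem.Set Int × List (List Int)) p =>
          if PySem.Set.contains s.1 p.1 then s
          else
            let r := pvStack graph [p.1] s.1 []
            (r.1, s.2 ++ [r.2])) (v, comps) := by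
  intro l
  induction l with
  | nil => intro v comps; rfl
  | cons p l ihl =>
    intro v comps
    simp only [List.foldl_cons]
    by_cases hc : PySem.Set.contains v p.1
    · simp only [hc, if_true]; exact ihl v comps
    · have hkv : p.1 ∉ v := by simpa [PySem.Set.contains_iff] using hc
      simp only [hc, Bool.false_eq_true, if_false, pv_start_eq graph v p.1 hkv]
      exact ihl _ _

-- ===== VERDICT (by name: the statement is the Claim_ definition above) =====
theorem dfs_all_components_spec : Claim_equal_dfs_all_components := by
  intro graph _ _
  unfold Spec_dfs_all_components dfs_all_components dfs_all_components_alt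
  by_cases hg : graph = []
  · subst hg; rfl
  · simp only [hg, if_false]
    rw [pv_outer_eq graph graph PySem.Set.empty []]
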